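-- pv_equiv track=rewrite | github.com/manojdevaki/ai-for-bharat | src/services/regulatory/analyzer.py | _generate_warnings
-- ===== SOURCE A (Python) =====
-- from typing import Dict, Any, List, Optional
--
-- def _generate_warnings(ingredient_data: Dict[str, Any], statuses: Dict[str, str]) -> List[str]:
--     """Generate warnings based on regulatory data"""
--     warnings = []
--
--     # Check for banned status
--     for jurisdiction, status in statuses.items():
--         if status == 'banned':
--             warnings.append(f"⚠️ This ingredient is BANNED in {jurisdiction.upper()}")
--
--     # Check for warning requirements
--     for jurisdiction, status in statuses.items():
--         if status == 'approved_with_warning':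
--             warnings.append(f"⚠️ Warning labels required in {jurisdiction.upper()}")
--         elif status == 'not_listed':
--             warnings.append(f"ℹ️ No direct listing found in {jurisdiction.upper()} official source set")
--
--     # Check for specific notes
--     notes = ingredient_data.get('notes', '')
--     if 'cancer' in notes.lower():
--         warnings.append("⚠️ Potential health concerns identified by some authorities")
--
--     return warnings
-- ===== SOURCE B (Python) =====
-- def _generate_warnings(ingredient_data, statuses):
--     """Stable-sort the status items banned-first, then one mapping pass builds all messages."""
--     def msg(jurisdiction, status):
--         if status == 'banned':
--             return f"\u26a0\ufe0f This ingredient is BANNED in {jurisdiction.upper()}"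
--         if status == 'approved_with_warning':
--             return f"\u26a0\ufe0f Warning labels required in {jurisdiction.upper()}"
--         if status == 'not_listed':
--             return f"\u2139\ufe0f No direct listing found in {jurisdiction.upper()} official source set"
--         return None
--
--     ordered = sorted(statuses.items(), key=lambda kv: kv[1] != 'banned')
--     warnings = [m for m in (msg(j, s) for j, s in ordered) if m is not None]
--     if 'cancer' in ingredient_data.get('notes', '').lower():
--         warnings.append("\u26a0\ufe0f Potential health concerns identified by some authorities")
--     return warnings
-- ===== Notes on version B (the rewrite author's own statement) =====
-- stated objective: alternative
-- what changed: Replaces A's two sequential filtered scans with a sort-then-map strategy: the status items are stably sorted by a banned-first boolean key (stability reproduces A's relative ordering), and a single filterMap turns each item into its message.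
import Mathlib
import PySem

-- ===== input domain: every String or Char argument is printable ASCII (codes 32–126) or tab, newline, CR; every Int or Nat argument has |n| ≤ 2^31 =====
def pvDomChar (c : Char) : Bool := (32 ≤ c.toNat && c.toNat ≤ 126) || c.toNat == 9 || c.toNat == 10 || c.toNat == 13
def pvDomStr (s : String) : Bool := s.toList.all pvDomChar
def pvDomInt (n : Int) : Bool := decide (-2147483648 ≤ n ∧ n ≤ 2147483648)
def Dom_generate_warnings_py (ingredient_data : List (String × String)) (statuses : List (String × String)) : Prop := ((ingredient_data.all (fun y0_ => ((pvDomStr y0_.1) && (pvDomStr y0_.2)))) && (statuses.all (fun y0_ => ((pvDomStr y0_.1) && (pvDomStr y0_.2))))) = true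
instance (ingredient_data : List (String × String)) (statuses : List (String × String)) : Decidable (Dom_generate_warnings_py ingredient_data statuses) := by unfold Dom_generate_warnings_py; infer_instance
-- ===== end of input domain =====

-- B replaces A's two filtered scans by a stable banned-first sort of the items followed by one message-building pass; same return value.
-- ===== PORT A =====
-- shared f-string / lookup helpers
def pvMsgBanned (j : String) : String := "⚠️ This ingredient is BANNED in " ++ PySem.Str.upper j
def pvMsgWarn (j : String) : String := "⚠️ Warning labels required in " ++ PySem.Str.upper j
def pvMsgNotListed (j : String) : String := "ℹ️ No direct listing found in " ++ PySem.Str.upper j ++ " official source set"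
def pvMsgCancer : String := "⚠️ Potential health concerns identified by some authorities"
def pvNotesOf (ingredient_data : List (String × String)) : String :=
  ((ingredient_data.find? (fun kv => kv.1 == "notes")).map (·.2)).getD ""

-- A's first loop body
def pvStepBanned (acc : List String) (js : String × String) : List String :=
  if js.2 = "banned" then acc ++ [pvMsgBanned js.1] else acc
-- A's second loop body
def pvStepOther (acc : List String) (js : String × String) : List String :=
  if js.2 = "approved_with_warning" then acc ++ [pvMsgWarn js.1]
  else if js.2 = "not_listed" then acc ++ [pvMsgNotListed js.1]
  else acc

def generate_warnings_py (ingredient_data : List (String × String)) (statuses : List (String × String)) : List String :=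
  let warnings : List String := []
  let warnings := statuses.foldl pvStepBanned warnings
  let warnings := statuses.foldl pvStepOther warnings
  let notes := pvNotesOf ingredient_data
  if PySem.Str.isIn "cancer" (PySem.Str.lower notes) then warnings ++ [pvMsgCancer] else warnings

-- ===== PORT B =====
-- B's sort key: Python's kv[1] != 'banned' (False < True), as 0/1
def pvKey (kv : String × String) : Nat := if kv.2 = "banned" then 0 else 1
-- B's msg helper: the message for one item, or None
def pvMsg? (kv : String × String) : Option String :=
  if kv.2 = "banned" then some (pvMsgBanned kv.1)
  else if kv.2 = "approved_with_warning" then some (pvMsgWarn kv.1)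
  else if kv.2 = "not_listed" then some (pvMsgNotListed kv.1)
  else none

def generate_warnings_py_alt (ingredient_data : List (String × String)) (statuses : List (String × String)) : List String :=
  let ordered := PySem.List.sorted statuses pvKey
  let warnings := ordered.filterMap pvMsg?
  if PySem.Str.isIn "cancer" (PySem.Str.lower (pvNotesOf ingredient_data)) then warnings ++ [pvMsgCancer] else warnings

-- ===== PRECONDITION & SPEC =====
def Spec_generate_warnings_py (ingredient_data : List (String × String)) (statuses : List (String × String)) (out : List String) : Prop := out = generate_warnings_py_alt ingredient_data statuses
instance (ingredient_data : List (String × String)) (statuses : List (String × String)) (out : List String) : Decidable (Spec_generate_warnings_py ingredient_data statuses out) := by unfold Spec_generate_warnings_py; infer_instance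

-- ===== CLAIM =====
def Claim_equal_generate_warnings_py : Prop := ∀ (ingredient_data : List (String × String)) (statuses : List (String × String)), Dom_generate_warnings_py ingredient_data statuses → Spec_generate_warnings_py ingredient_data statuses (generate_warnings_py ingredient_data statuses)

-- ===== LEMMAS AND PROOFS =====
-- the insertion comparator of B's sort
def pvBef (a b : String × String) : Bool := decide (pvKey a < pvKey b)

-- a key-0 element is inserted between the key-0 prefix and the key-1 suffix
theorem pv_insert0 (l0 l1 : List (String × String)) (x : String × String)
    (h0 : ∀ y ∈ l0, pvKey y = 0) (h1 : ∀ y ∈ l1, pvKey y = 1) (hx : pvKey x = 0) :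
    PySem.List.insertBy pvBef x (l0 ++ l1) = l0 ++ x :: l1 := by
  induction l0 with
  | nil =>
    cases l1 with
    | nil => simp [PySem.List.insertBy]
    | cons y ys =>
      have hy := h1 y List.mem_cons_self
      simp [PySem.List.insertBy, pvBef, hx, hy]
  | cons y l0' ih =>
    have hy := h0 y List.mem_cons_self
    simp only [List.cons_append]
    rw [show PySem.List.insertBy pvBef x (y :: (l0' ++ l1))
          = if pvBef x y then x :: y :: (l0' ++ l1) else y :: PySem.List.insertBy pvBef x (l0' ++ l1)
        from rfl]
    simp [pvBef, hx, hy, ih (fun z hz => h0 z (List.mem_cons_of_mem _ hz))]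

-- every key is 0 or 1, so a key-1 element never goes before anything: it lands at the end
theorem pv_key_le_one (y : String × String) : pvKey y ≤ 1 := by
  unfold pvKey; split <;> omega

-- B's insertion-sort fold over a bucketed accumulator splits the list by key, stably
theorem pv_fold_insert (xs : List (String × String)) (l0 l1 : List (String × String))
    (h0 : ∀ y ∈ l0, pvKey y = 0) (h1 : ∀ y ∈ l1, pvKey y = 1) :
    xs.foldl (fun acc x => PySem.List.insertBy pvBef x acc) (l0 ++ l1)
      = (l0 ++ xs.filter (fun kv => pvKey kv == 0)) ++ (l1 ++ xs.filter (fun kv => pvKey kv != 0)) := by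
  induction xs generalizing l0 l1 with
  | nil => simp
  | cons x rest ih =>
    rw [List.foldl_cons]
    by_cases hx : pvKey x = 0
    · have h0' : ∀ y ∈ l0 ++ [x], pvKey y = 0 := by
        intro y hy
        rcases List.mem_append.1 hy with h | h
        · exact h0 y h
        · simp at h; simpa [h] using hx
      rw [pv_insert0 l0 l1 x h0 h1 hx,
          show l0 ++ x :: l1 = (l0 ++ [x]) ++ l1 by simp,
          ih (l0 ++ [x]) l1 h0' h1,
          List.filter_cons_of_pos (by simpa using hx),
          List.filter_cons_of_neg (by simpa using hx)]
      simp
    · have hx1 : pvKey x = 1 := by have := pv_key_le_one x; omega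
      have h1' : ∀ y ∈ l1 ++ [x], pvKey y = 1 := by
        intro y hy
        rcases List.mem_append.1 hy with h | h
        · exact h1 y h
        · simp at h; simpa [h] using hx1
      have hnb : ∀ y ∈ l0 ++ l1, pvBef x y = false := by
        intro y hy
        rcases List.mem_append.1 hy with h | h
        · simp [pvBef, h0 y h, hx1]
        · simp [pvBef, h1 y h, hx1]
      rw [PySem.List.insertBy_of_forall_not_before pvBef x (l0 ++ l1) hnb,
          List.append_assoc,
          ih l0 (l1 ++ [x]) h0 h1',
          List.filter_cons_of_neg (by simpa using hx),
          List.filter_cons_of_pos (by simpa using hx)]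
      simp

-- B's stable sort = key-0 items (in order) ++ key-1 items (in order)
theorem pv_sorted_split (xs : List (String × String)) :
    PySem.List.sorted xs pvKey
      = xs.filter (fun kv => pvKey kv == 0) ++ xs.filter (fun kv => pvKey kv != 0) := by
  rw [PySem.List.sorted_eq_foldl_insertBy xs pvKey]
  have := pv_fold_insert xs [] [] (by simp) (by simp)
  simpa [pvBef] using this

-- banned-only and other-only message extractors
def pvMsgB? (kv : String × String) : Option String :=
  if kv.2 = "banned" then some (pvMsgBanned kv.1) else none
def pvMsgO? (kv : String × String) : Option String :=
  if kv.2 = "approved_with_warning" then some (pvMsgWarn kv.1)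
  else if kv.2 = "not_listed" then some (pvMsgNotListed kv.1)
  else none

-- A's first loop is the banned-message extraction
theorem pv_foldA_banned (xs : List (String × String)) (acc : List String) :
    xs.foldl pvStepBanned acc = acc ++ xs.filterMap pvMsgB? := by
  induction xs generalizing acc with
  | nil => simp
  | cons x rest ih =>
    rw [List.foldl_cons, ih]
    by_cases hx : x.2 = "banned"
    · rw [List.filterMap_cons_some (show pvMsgB? x = some (pvMsgBanned x.1) by simp [pvMsgB?, hx])]
      simp [pvStepBanned, hx]
    · rw [List.filterMap_cons_none (show pvMsgB? x = none by simp [pvMsgB?, hx])]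
      simp [pvStepBanned, hx]

-- A's second loop is the other-message extraction
theorem pv_foldA_other (xs : List (String × String)) (acc : List String) :
    xs.foldl pvStepOther acc = acc ++ xs.filterMap pvMsgO? := by
  induction xs generalizing acc with
  | nil => simp
  | cons x rest ih =>
    rw [List.foldl_cons, ih]
    by_cases hw : x.2 = "approved_with_warning"
    · rw [List.filterMap_cons_some (show pvMsgO? x = some (pvMsgWarn x.1) by simp [pvMsgO?, hw])]
      simp [pvStepOther, hw]
    · by_cases hn : x.2 = "not_listed"
      · rw [List.filterMap_cons_some (show pvMsgO? x = some (pvMsgNotListed x.1) by simp [pvMsgO?, hn])]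
        simp [pvStepOther, hn]
      · rw [List.filterMap_cons_none (show pvMsgO? x = none by simp [pvMsgO?, hw, hn])]
        simp [pvStepOther, hw, hn]

-- on the key-0 bucket, B's msg produces exactly the banned messages of the whole list
theorem pv_filterMap_bucket0 (xs : List (String × String)) :
    (xs.filter (fun kv => pvKey kv == 0)).filterMap pvMsg? = xs.filterMap pvMsgB? := by
  induction xs with
  | nil => rfl
  | cons x rest ih =>
    by_cases hx : x.2 = "banned"
    · rw [List.filter_cons_of_pos (by simp [pvKey, hx]),
          List.filterMap_cons_some (show pvMsg? x = some (pvMsgBanned x.1) by simp [pvMsg?, hx]),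
          List.filterMap_cons_some (show pvMsgB? x = some (pvMsgBanned x.1) by simp [pvMsgB?, hx]), ih]
    · rw [List.filter_cons_of_neg (by simp [pvKey, hx]),
          List.filterMap_cons_none (show pvMsgB? x = none by simp [pvMsgB?, hx]), ih]

-- on the key-1 bucket, B's msg produces exactly the other messages of the whole list
theorem pv_filterMap_bucket1 (xs : List (String × String)) :
    (xs.filter (fun kv => pvKey kv != 0)).filterMap pvMsg? = xs.filterMap pvMsgO? := by
  induction xs with
  | nil => rfl
  | cons x rest ih =>
    by_cases hx : x.2 = "banned"
    · have hw : x.2 ≠ "approved_with_warning" := by simp [hx]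
      have hn : x.2 ≠ "not_listed" := by simp [hx]
      rw [List.filter_cons_of_neg (by simp [pvKey, hx]),
          List.filterMap_cons_none (show pvMsgO? x = none by simp [pvMsgO?, hw, hn]), ih]
    · rw [List.filter_cons_of_pos (by simp [pvKey, hx])]
      by_cases hw : x.2 = "approved_with_warning"
      · rw [List.filterMap_cons_some (show pvMsg? x = some (pvMsgWarn x.1) by simp [pvMsg?, hw]),
            List.filterMap_cons_some (show pvMsgO? x = some (pvMsgWarn x.1) by simp [pvMsgO?, hw]), ih]
      · by_cases hn : x.2 = "not_listed"
        · rw [List.filterMap_cons_some (show pvMsg? x = some (pvMsgNotListed x.1) by simp [pvMsg?, hn]),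
              List.filterMap_cons_some (show pvMsgO? x = some (pvMsgNotListed x.1) by simp [pvMsgO?, hn]), ih]
        · rw [List.filterMap_cons_none (show pvMsg? x = none by simp [pvMsg?, hx, hw, hn]),
              List.filterMap_cons_none (show pvMsgO? x = none by simp [pvMsgO?, hw, hn]), ih]

-- ===== VERDICT =====
theorem generate_warnings_py_spec : Claim_equal_generate_warnings_py := by
  intro ingredient_data statuses _
  unfold Spec_generate_warnings_py generate_warnings_py generate_warnings_py_alt
  simp only [pv_sorted_split, List.filterMap_append, pv_filterMap_bucket0, pv_filterMap_bucket1,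
             pv_foldA_banned, pv_foldA_other, List.nil_append]
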